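-- pv_equiv track=rewrite | github.com/yiiilonggg/LeetCode | 2560. House Robber IV/Solution.py | check
-- ===== SOURCE A (Python) =====
-- def check(nums, k, mid):
--     i, n = 0, len(nums)
--     while i < n and k > 0:
--         if nums[i] <= mid:
--             k -= 1
--             i += 2
--         else:
--             i += 1
--     return k == 0
-- ===== SOURCE B (Python) =====
-- def check(nums, k, mid):
--     if k <= 0:
--         return k == 0
--     prev = cur = 0
--     for x in nums:
--         nxt = max(cur, prev + 1) if x <= mid else cur
--         prev, cur = cur, nxt
--     return cur >= k
-- ===== Notes on version B (the rewrite author's own statement) =====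
-- stated objective: alternative
-- what changed: Replaced the greedy index-jumping while-loop (take a <=mid element, skip the next index, decrement the budget k) by a House-Robber rolling DP computing the maximum number of non-adjacent elements <= mid, comparing that maximum with k.
import Mathlib
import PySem

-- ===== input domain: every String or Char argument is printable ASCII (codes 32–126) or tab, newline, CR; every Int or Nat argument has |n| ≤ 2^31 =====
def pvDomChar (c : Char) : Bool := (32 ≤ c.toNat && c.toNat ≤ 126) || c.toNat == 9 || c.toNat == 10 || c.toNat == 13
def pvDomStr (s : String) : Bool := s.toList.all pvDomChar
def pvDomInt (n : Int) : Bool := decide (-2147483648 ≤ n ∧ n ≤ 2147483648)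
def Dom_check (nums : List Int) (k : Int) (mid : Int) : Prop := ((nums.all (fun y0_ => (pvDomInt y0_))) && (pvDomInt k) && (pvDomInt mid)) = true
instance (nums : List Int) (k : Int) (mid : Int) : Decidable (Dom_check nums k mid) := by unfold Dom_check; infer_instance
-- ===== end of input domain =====

-- B replaces A's greedy budget-decrementing index loop by a rolling House-Robber DP
-- (max count of non-adjacent elements ≤ mid, compared with k); alternative decomposition, same cost.

-- ===== PORT A =====
-- the while-loop of A: state (i, k), exits when i ≥ len(nums) or k ≤ 0, returns final k
def checkLoop (nums : List Int) (mid : Int) (i : Nat) (k : Int) : Int :=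
  if _h : i < nums.length ∧ k > 0 then
    if nums.getD i 0 ≤ mid then checkLoop nums mid (i + 2) (k - 1)
    else checkLoop nums mid (i + 1) k
  else k
termination_by nums.length - i
decreasing_by all_goals omega

def check (nums : List Int) (k : Int) (mid : Int) : Bool :=
  checkLoop nums mid 0 k == 0

-- ===== PORT B =====
-- one DP step: (prev, cur) ↦ (cur, max(cur, prev+1) if x ≤ mid else cur)
def dpStep (mid : Int) (pc : Int × Int) (x : Int) : Int × Int :=
  (pc.2, if x ≤ mid then max pc.2 (pc.1 + 1) else pc.2)

def check_alt (nums : List Int) (k : Int) (mid : Int) : Bool :=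
  if k ≤ 0 then k == 0
  else (nums.foldl (dpStep mid) (0, 0)).2 ≥ k

-- ===== PRECONDITION & SPEC =====
def Spec_check (nums : List Int) (k : Int) (mid : Int) (out : Bool) : Prop := out = check_alt nums k mid
instance (nums : List Int) (k : Int) (mid : Int) (out : Bool) : Decidable (Spec_check nums k mid out) := by unfold Spec_check; infer_instance

-- ===== CLAIM (what is proved, stated in full; the proofs are below) =====
def Claim_equal_check : Prop := ∀ (nums : List Int) (k : Int) (mid : Int), Dom_check nums k mid → Spec_check nums k mid (check nums k mid)

-- ===== LEMMAS AND PROOFS =====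

-- greedy count of non-adjacent elements ≤ mid (unbounded budget)
def Gcount (mid : Int) : List Int → Int
  | [] => 0
  | x :: xs => if x ≤ mid then 1 + Gcount mid (xs.drop 1) else Gcount mid xs
termination_by l => l.length
decreasing_by all_goals (simp; try omega)

theorem Gcount_nonneg (mid : Int) : ∀ (l : List Int), 0 ≤ Gcount mid l
  | [] => by simp [Gcount]
  | x :: xs => by
    rw [Gcount]
    split
    · have := Gcount_nonneg mid (xs.drop 1); omega
    · exact Gcount_nonneg mid xs
termination_by l => l.length
decreasing_by all_goals (simp; try omega)

-- A's loop computes k - min k (Gcount mid (nums.drop i)) for 0 ≤ k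
theorem checkLoop_eq (mid : Int) (nums : List Int) : ∀ (i : Nat) (k : Int), 0 ≤ k →
    checkLoop nums mid i k = k - min k (Gcount mid (nums.drop i))
  | i, k, hk => by
    rw [checkLoop]
    by_cases hc : i < nums.length ∧ k > 0
    · rw [dif_pos hc]
      have hdrop : nums.drop i = nums.getD i 0 :: nums.drop (i + 1) := by
        rw [List.getD_eq_getElem _ _ hc.1, List.drop_eq_getElem_cons hc.1]
      by_cases hx : nums.getD i 0 ≤ mid
      · rw [if_pos hx, checkLoop_eq mid nums (i + 2) (k - 1) (by omega)]
        have h2 : (nums.drop (i + 1)).drop 1 = nums.drop (i + 2) := by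
          rw [List.drop_drop]
        rw [hdrop, Gcount, if_pos hx, h2]
        have := Gcount_nonneg mid (nums.drop (i + 2))
        omega
      · rw [if_neg hx, checkLoop_eq mid nums (i + 1) k hk]
        rw [hdrop, Gcount, if_neg hx]
    · rw [dif_neg hc]
      by_cases hi : i < nums.length
      · have hk0 : k = 0 := by
          rcases not_and_or.mp hc with h | h
          · exact absurd hi h
          · omega
        have := Gcount_nonneg mid (nums.drop i)
        omega
      · have hnil : nums.drop i = [] := List.drop_eq_nil_of_le (by omega)
        rw [hnil]
        simp [Gcount]
        omega
termination_by i k _ => nums.length - i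
decreasing_by all_goals omega

-- greedy re-expressed as a left-to-right scan with a "just took one, skip this" flag
def Hloop (mid : Int) : List Int → Int → Bool → Int
  | [], c, _ => c
  | x :: xs, c, b =>
    if b then Hloop mid xs c false
    else if x ≤ mid then Hloop mid xs (c + 1) true
    else Hloop mid xs c false

theorem Hloop_false (mid : Int) : ∀ (l : List Int) (c : Int), Hloop mid l c false = c + Gcount mid l
  | [], c => by simp [Hloop, Gcount]
  | x :: xs, c => by
    rw [Hloop]
    by_cases hx : x ≤ mid
    · rw [if_neg (by simp), if_pos hx, Gcount, if_pos hx]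
      cases xs with
      | nil => simp [Hloop, Gcount]
      | cons y ys =>
        rw [show Hloop mid (y :: ys) (c + 1) true = Hloop mid ys (c + 1) false from by
          rw [Hloop, if_pos rfl]]
        rw [Hloop_false mid ys (c + 1)]
        simp only [List.drop_succ_cons, List.drop_zero]
        ring
    · rw [if_neg (by simp), if_neg hx, Gcount, if_neg hx, Hloop_false mid xs c]
termination_by l _ => l.length
decreasing_by all_goals (simp; try omega)

-- the DP fold simulates Hloop: cur = Hloop count, prev lags one behind while blocked
theorem fold_eq_Hloop (mid : Int) : ∀ (l : List Int) (c p : Int) (b : Bool),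
    p = (cond b (c - 1) c) → (l.foldl (dpStep mid) (p, c)).2 = Hloop mid l c b
  | [], c, p, b, _ => by simp [Hloop]
  | x :: xs, c, p, b, h => by
    rw [List.foldl_cons]
    cases b with
    | true =>
      have h2 : dpStep mid (p, c) x = (c, c) := by
        rw [h, Bool.cond_true]
        simp only [dpStep]
        have hc : c - 1 + 1 = c := by omega
        rw [hc, max_self, ite_self]
      rw [h2, fold_eq_Hloop mid xs c c false rfl, Hloop, if_pos rfl]
    | false =>
      rw [h, Bool.cond_false]
      by_cases hx : x ≤ mid
      · have h2 : dpStep mid (c, c) x = (c, c + 1) := by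
          simp only [dpStep, if_pos hx]
          rw [max_eq_right (by omega)]
        rw [h2, fold_eq_Hloop mid xs (c + 1) c true (by rw [Bool.cond_true]; omega)]
        rw [Hloop, if_neg (by simp), if_pos hx]
      · have h2 : dpStep mid (c, c) x = (c, c) := by
          simp only [dpStep, if_neg hx]
        rw [h2, fold_eq_Hloop mid xs c c false rfl]
        rw [Hloop, if_neg (by simp), if_neg hx]

theorem fold_eq_Gcount (mid : Int) (l : List Int) :
    (l.foldl (dpStep mid) (0, 0)).2 = Gcount mid l := by
  rw [fold_eq_Hloop mid l 0 0 false rfl, Hloop_false]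
  omega

-- ===== VERDICT (by name: the statement is the Claim_ definition above) =====
theorem check_spec : Claim_equal_check := by
  intro nums k mid _
  unfold Spec_check check check_alt
  by_cases hk : k ≤ 0
  · rw [if_pos hk, checkLoop, dif_neg (fun h => absurd h.2 (by omega))]
  · rw [if_neg hk]
    have hk' : 0 < k := by omega
    rw [checkLoop_eq mid nums 0 k (le_of_lt hk'), List.drop_zero, fold_eq_Gcount]
    by_cases hg : k ≤ Gcount mid nums
    · rw [min_eq_left hg]
      simp [hg]
    · have hg2 : Gcount mid nums < k := by omega
      rw [min_eq_right hg2.le]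
      have hne : k - Gcount mid nums ≠ 0 := by omega
      simp [hne, hg]
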